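-- pv_equiv track=rewrite | github.com/akashkothari2007/KothariGroupReceiptSoftware | backend/routers/statements.py | parse_mc_description
-- ===== SOURCE A (Python) =====
-- MC_KNOWN_CITIES = {
--     "TORONTO", "MISSISSAUGA", "WINNIPEG", "VANCOUVER", "VICTORIA", "SIDNEY",
--     "MARKHAM", "ETOBICOKE", "BURNABY", "LEDUC", "SAANICHTON", "NORTH YORK",
--     "ST CATHARINES", "OTTAWA", "CALGARY", "EDMONTON", "MONTREAL", "HAMILTON",
--     "BRAMPTON", "SCARBOROUGH", "RICHMOND", "SURREY", "OAKVILLE", "KITCHENER",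
--     "LONDON", "WATERLOO", "BARRIE", "GUELPH", "THUNDER BAY", "REGINA",
--     "SASKATOON", "HALIFAX", "FREDERICTON", "CHARLOTTETOWN", "WHITEHORSE",
--     "YELLOWKNIFE", "IQALUIT", "MIAMI", "NEW YORK", "LOS ANGELES", "CHICAGO",
--     "SAN FRANCISCO", "SEATTLE", "BOSTON", "LAS VEGAS", "ORLANDO",
-- }
--
-- def parse_mc_description(desc1: str):
--     """Extract merchant name and city from MC Description 1.
--     Format is typically 'MERCHANT_NAME CITY' where city is the last word(s)."""
--     if not desc1 or not desc1.strip():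
--         return None, None
--     desc = desc1.strip()
--
--     # Try matching two-word cities first, then single-word
--     upper = desc.upper()
--     for city in MC_KNOWN_CITIES:
--         if upper.endswith(" " + city):
--             merchant = desc[:-(len(city))].strip().rstrip("-")
--             return merchant.strip() or desc, city.title()
--
--     # Fallback: last word is city
--     parts = desc.rsplit(" ", 1)
--     if len(parts) == 2 and len(parts[1]) >= 3:
--         return parts[0].strip().rstrip("-"), parts[1].title()
--
--     return desc, None
-- ===== SOURCE B (Python) =====
-- MC_KNOWN_CITIES = {
--     "TORONTO", "MISSISSAUGA", "WINNIPEG", "VANCOUVER", "VICTORIA", "SIDNEY",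
--     "MARKHAM", "ETOBICOKE", "BURNABY", "LEDUC", "SAANICHTON", "NORTH YORK",
--     "ST CATHARINES", "OTTAWA", "CALGARY", "EDMONTON", "MONTREAL", "HAMILTON",
--     "BRAMPTON", "SCARBOROUGH", "RICHMOND", "SURREY", "OAKVILLE", "KITCHENER",
--     "LONDON", "WATERLOO", "BARRIE", "GUELPH", "THUNDER BAY", "REGINA",
--     "SASKATOON", "HALIFAX", "FREDERICTON", "CHARLOTTETOWN", "WHITEHORSE",
--     "YELLOWKNIFE", "IQALUIT", "MIAMI", "NEW YORK", "LOS ANGELES", "CHICAGO",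
--     "SAN FRANCISCO", "SEATTLE", "BOSTON", "LAS VEGAS", "ORLANDO",
-- }
--
--
-- def parse_mc_description(desc1: str):
--     """Extract merchant name and city from MC Description 1.
--
--     One rsplit(" ", 2) yields the only two suffix candidates a known city
--     could be (cities have at most two words), so each is a single set lookup
--     instead of an endswith scan over the whole city table; the fallback is
--     derived from the same parts.
--     """
--     stripped = desc1.strip() if desc1 else ""
--     if not stripped:
--         return None, None
--
--     parts = stripped.rsplit(" ", 2)
--     ups = [p.upper() for p in parts]
--     city = None
--     if len(parts) == 3 and ups[1] + " " + ups[2] in MC_KNOWN_CITIES: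
--         city = ups[1] + " " + ups[2]
--     elif len(parts) >= 2 and ups[-1] in MC_KNOWN_CITIES:
--         city = ups[-1]
--
--     if city is not None:
--         merchant = stripped[:-len(city)].strip().rstrip("-")
--         return merchant.strip() or stripped, city.title()
--
--     if len(parts) >= 2 and len(parts[-1]) >= 3:
--         return " ".join(parts[:-1]).strip().rstrip("-"), parts[-1].title()
--     return stripped, None
-- ===== Notes on version B (the rewrite author's own statement) =====
-- stated objective: alternative
-- what changed: B replaces A's endswith scan over the whole 46-city table by one space-rsplit into at most three parts: the parts give the only two suffix candidates a known city could be (last word / last two words), each checked by a single set lookup, and the fallback is derived from the same parts instead of a second rsplit.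
import Mathlib
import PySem

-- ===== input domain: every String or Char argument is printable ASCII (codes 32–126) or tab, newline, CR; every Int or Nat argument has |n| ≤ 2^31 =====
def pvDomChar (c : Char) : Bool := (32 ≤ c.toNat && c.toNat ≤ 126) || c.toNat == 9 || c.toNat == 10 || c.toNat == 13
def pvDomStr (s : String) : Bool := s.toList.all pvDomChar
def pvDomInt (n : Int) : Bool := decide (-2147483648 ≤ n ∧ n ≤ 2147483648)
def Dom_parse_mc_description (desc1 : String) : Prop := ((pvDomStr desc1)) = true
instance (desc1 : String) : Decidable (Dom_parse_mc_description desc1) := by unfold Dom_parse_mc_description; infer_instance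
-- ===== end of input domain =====

-- B replaces A's endswith scan over the whole city table by one rsplit at maxsplit 2: the parts give the
-- only two suffix candidates a known city could be (cities have at most two words), each a single
-- membership lookup, and the fallback is derived from the same parts. A iterates over a Python set;
-- at most one city can match (no known city is a one-word suffix of another — pv_no_conflict below),
-- so A's result is independent of the set's iteration order and the port iterates the literal list
-- in source order.

-- shared module-level constant MC_KNOWN_CITIES (source order)
def mcKnownCities : List String :=
  ["TORONTO", "MISSISSAUGA", "WINNIPEG", "VANCOUVER", "VICTORIA", "SIDNEY",
   "MARKHAM", "ETOBICOKE", "BURNABY", "LEDUC", "SAANICHTON", "NORTH YORK",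
   "ST CATHARINES", "OTTAWA", "CALGARY", "EDMONTON", "MONTREAL", "HAMILTON",
   "BRAMPTON", "SCARBOROUGH", "RICHMOND", "SURREY", "OAKVILLE", "KITCHENER",
   "LONDON", "WATERLOO", "BARRIE", "GUELPH", "THUNDER BAY", "REGINA",
   "SASKATOON", "HALIFAX", "FREDERICTON", "CHARLOTTETOWN", "WHITEHORSE",
   "YELLOWKNIFE", "IQALUIT", "MIAMI", "NEW YORK", "LOS ANGELES", "CHICAGO",
   "SAN FRANCISCO", "SEATTLE", "BOSTON", "LAS VEGAS", "ORLANDO"]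

-- hand port of str.title(); exact on the ASCII domain (a char is "cased" iff alphabetic)
def pyTitleGo (prevAlpha : Bool) : List Char → List Char
  | [] => []
  | c :: rest =>
      (if PySem.Chars.isalpha c then
        (if prevAlpha then PySem.Chars.lowerChar c else PySem.Chars.upperChar c)
       else c) :: pyTitleGo (PySem.Chars.isalpha c) rest

def pyTitle (s : List Char) : List Char := pyTitleGo false s

-- hand port of str.rstrip("-"): drop trailing '-' characters; exact
def pyRstripDash (s : List Char) : List Char := (s.reverse.dropWhile (· == '-')).reverse

-- ===== PORT A =====

-- hand port of the rsplit at maxsplit 1 in A: split at the last space, if any; exact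
def pyRsplitSpace1 (s : List Char) : List (List Char) :=
  let i := PySem.Chars.rfind s [' ']
  if i = -1 then [s] else [s.take i.toNat, s.drop (i.toNat + 1)]

-- the matched-city branch: merchant = desc[:-(len(city))].strip().rstrip("-");
-- return merchant.strip() or desc, city.title()
def aHit (desc city : List Char) : Option String × Option String :=
  let merchant := pyRstripDash (PySem.Chars.strip (PySem.Chars.slice desc none (some (-(city.length : Int)))))
  ((if PySem.Chars.strip merchant = [] then some (String.ofList desc) else some (String.ofList (PySem.Chars.strip merchant))),
   some (String.ofList (pyTitle city)))

def aFallback (desc : List Char) : Option String × Option String :=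
  let parts := pyRsplitSpace1 desc
  if parts.length = 2 ∧ 3 ≤ (parts.getD 1 []).length then
    (some (String.ofList (pyRstripDash (PySem.Chars.strip (parts.getD 0 [])))),
     some (String.ofList (pyTitle (parts.getD 1 []))))
  else (some (String.ofList desc), none)

def aMain (desc : List Char) : Option String × Option String :=
  let upper := PySem.Chars.upper desc
  match List.find? (fun city => PySem.Chars.endswith upper (' ' :: city.toList)) mcKnownCities with
  | some city => aHit desc city.toList
  | none => aFallback desc

def parse_mc_description (desc1 : String) : Option String × Option String :=
  if desc1.toList = [] ∨ (PySem.Str.strip desc1).toList = [] then (none, none)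
  else aMain ((PySem.Str.strip desc1).toList)

-- ===== PORT B =====

def mcCitiesChars : List (List Char) := mcKnownCities.map String.toList

-- hand port of stripped.rsplit into at most 3 parts: cut at the last space, then at the last space of the head; exact
def pyRsplitSpace2 (s : List Char) : List (List Char) :=
  let i := PySem.Chars.rfind s [' ']
  if i = -1 then [s]
  else
    let h := s.take i.toNat
    let t := s.drop (i.toNat + 1)
    let j := PySem.Chars.rfind h [' ']
    if j = -1 then [h, t] else [h.take j.toNat, h.drop (j.toNat + 1), t]

-- the candidate selection of Source B: two-word candidate from parts[1]/parts[2], else last part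
def bCityOf (parts : List (List Char)) : Option (List Char) :=
  let ups := parts.map PySem.Chars.upper
  if parts.length = 3 ∧ mcCitiesChars.contains (ups.getD 1 [] ++ ' ' :: ups.getD 2 []) then
    some (ups.getD 1 [] ++ ' ' :: ups.getD 2 [])
  else if 2 ≤ parts.length ∧ mcCitiesChars.contains (ups.getLastD []) then
    some (ups.getLastD [])
  else none

def bCore (stripped : List Char) : Option String × Option String :=
  let parts := pyRsplitSpace2 stripped
  match bCityOf parts with
  | some city =>
      let merchant := pyRstripDash (PySem.Chars.strip (PySem.Chars.slice stripped none (some (-(city.length : Int)))))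
      ((if PySem.Chars.strip merchant = [] then some (String.ofList stripped) else some (String.ofList (PySem.Chars.strip merchant))),
       some (String.ofList (pyTitle city)))
  | none =>
      if 2 ≤ parts.length ∧ 3 ≤ (parts.getLastD []).length then
        (some (String.ofList (pyRstripDash (PySem.Chars.strip (List.intercalate [' '] parts.dropLast)))),
         some (String.ofList (pyTitle (parts.getLastD []))))
      else (some (String.ofList stripped), none)

def parse_mc_description_alt (desc1 : String) : Option String × Option String :=
  let stripped := if desc1.toList = [] then [] else (PySem.Str.strip desc1).toList
  if stripped = [] then (none, none) else bCore stripped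

-- ===== PRECONDITION & SPEC =====
def Spec_parse_mc_description (desc1 : String) (out : Option String × Option String) : Prop := out = parse_mc_description_alt desc1
instance (desc1 : String) (out : Option String × Option String) : Decidable (Spec_parse_mc_description desc1 out) := by unfold Spec_parse_mc_description; infer_instance

-- ===== CLAIM (what is proved, stated in full; the proofs are below) =====
def Claim_equal_parse_mc_description : Prop := ∀ (desc1 : String), Dom_parse_mc_description desc1 → Spec_parse_mc_description desc1 (parse_mc_description desc1)

-- ===== LEMMAS AND PROOFS =====

-- generic: unique split at an occurrence with no occurrence to its left
theorem pv_first_split_unique {α : Type} (x : α) :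
    ∀ (p q r s : List α), p ++ x :: q = r ++ x :: s → x ∉ p → x ∉ r → p = r ∧ q = s := by
  intro p
  induction p with
  | nil =>
      intro q r s h hp hr
      cases r with
      | nil => simpa using h
      | cons y r' =>
          simp only [List.nil_append, List.cons_append, List.cons.injEq] at h
          exact absurd (h.1 ▸ List.mem_cons_self) hr
  | cons y p' ih =>
      intro q r s h hp hr
      cases r with
      | nil =>
          simp only [List.nil_append, List.cons_append, List.cons.injEq] at h
          exact absurd (h.1 ▸ List.mem_cons_self) hp
      | cons z r' =>
          simp only [List.cons_append, List.cons.injEq] at h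
          obtain ⟨rfl, h2⟩ := h
          have := ih q r' s h2 (fun hm => hp (List.mem_cons_of_mem _ hm)) (fun hm => hr (List.mem_cons_of_mem _ hm))
          exact ⟨by rw [this.1], this.2⟩

-- unique split at the LAST occurrence
theorem pv_last_split_unique {α : Type} (x : α) (p q r s : List α)
    (h : p ++ x :: q = r ++ x :: s) (hq : x ∉ q) (hs : x ∉ s) : p = r ∧ q = s := by
  have h' : q.reverse ++ x :: p.reverse = s.reverse ++ x :: r.reverse := by
    have := congrArg List.reverse h
    simpa [List.reverse_append] using this
  have h2 := pv_first_split_unique x q.reverse p.reverse s.reverse r.reverse h'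
    (by simpa using hq) (by simpa using hs)
  constructor
  · have := congrArg List.reverse h2.2; simpa using this
  · have := congrArg List.reverse h2.1; simpa using this

-- decompose a list at the last occurrence of x
theorem pv_last_occ {α : Type} (x : α) : ∀ (l : List α), x ∈ l → ∃ a b, l = a ++ x :: b ∧ x ∉ b := by
  intro l
  induction l with
  | nil => intro h; cases h
  | cons y ys ih =>
      intro h
      by_cases hy : x ∈ ys
      · obtain ⟨a, b, rfl, hb⟩ := ih hy
        exact ⟨y :: a, b, rfl, hb⟩
      · have hxy : x = y := by
          rcases List.mem_cons.mp h with h' | h'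
          · exact h'
          · exact absurd h' hy
        exact ⟨[], ys, by rw [hxy]; rfl, hy⟩

-- a list with exactly one occurrence of x splits with x-free halves
theorem pv_count_one_split {α : Type} [DecidableEq α] (x : α) (l : List α)
    (h : l.count x = 1) : ∃ a b, l = a ++ x :: b ∧ x ∉ a ∧ x ∉ b := by
  have hm : x ∈ l := List.count_pos_iff.mp (by omega)
  obtain ⟨a, b, rfl, hb⟩ := pv_last_occ x l hm
  refine ⟨a, b, rfl, ?_, hb⟩
  intro ha
  have hca : 0 < a.count x := List.count_pos_iff.mpr ha
  rw [List.count_append, List.count_cons_self] at h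
  omega

-- ===== rfind spec for a single-character needle =====

theorem pv_go_eq_neg_one (s sub : List Char) (n : Nat)
    (h : ∀ i, i ≤ n → ¬ sub.isPrefixOf (s.drop i) = true) : PySem.Chars.rfind.go s sub n = -1 := by
  induction n with
  | zero =>
      have h0 := h 0 (by omega)
      rw [List.drop_zero] at h0
      rw [PySem.Chars.rfind.go, if_neg h0]
  | succ m ih =>
      rw [PySem.Chars.rfind.go, if_neg (h (m+1) (by omega))]
      exact ih (fun i hi => h i (by omega))

theorem pv_go_eq (s sub : List Char) (n i : Nat)
    (hi : i ≤ n) (hpre : sub.isPrefixOf (s.drop i) = true)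
    (hmax : ∀ j, i < j → j ≤ n → ¬ sub.isPrefixOf (s.drop j) = true) :
    PySem.Chars.rfind.go s sub n = (i : Int) := by
  induction n with
  | zero =>
      have hi0 : i = 0 := by omega
      subst hi0
      rw [List.drop_zero] at hpre
      rw [PySem.Chars.rfind.go, if_pos hpre]
      simp
  | succ m ih =>
      by_cases hei : i = m + 1
      · subst hei
        rw [PySem.Chars.rfind.go, if_pos hpre]
      · rw [PySem.Chars.rfind.go, if_neg (hmax (m+1) (by omega) (by omega))]
        exact ih (by omega) (fun j hj1 hj2 => hmax j hj1 (by omega))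

theorem pv_single_prefix_iff (c : Char) (l : List Char) :
    [c].isPrefixOf l = true ↔ ∃ t, l = c :: t := by
  rw [List.isPrefixOf_iff_prefix]
  constructor
  · rintro ⟨t, ht⟩
    exact ⟨t, by simpa using ht.symm⟩
  · rintro ⟨t, rfl⟩
    exact ⟨t, rfl⟩

theorem pv_rfind_not_mem (c : Char) (s : List Char) (h : c ∉ s) :
    PySem.Chars.rfind s [c] = -1 := by
  unfold PySem.Chars.rfind
  apply pv_go_eq_neg_one
  intro i _ hpre
  obtain ⟨t, ht⟩ := (pv_single_prefix_iff c _).mp hpre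
  exact h (List.mem_of_mem_drop (i := i) (ht ▸ List.mem_cons_self))

theorem pv_rfind_append (a b : List Char) (c : Char) (hb : c ∉ b) :
    PySem.Chars.rfind (a ++ c :: b) [c] = (a.length : Int) := by
  unfold PySem.Chars.rfind
  refine pv_go_eq _ _ _ a.length (by simp) ?_ ?_
  · rw [List.drop_left]
    rw [pv_single_prefix_iff]
    exact ⟨b, rfl⟩
  · intro j hj1 hj2 hpre
    obtain ⟨t, ht⟩ := (pv_single_prefix_iff c _).mp hpre
    set k := j - a.length - 1 with hk
    have hj : j - a.length = k + 1 := by omega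
    have h0 : (a ++ c :: b).drop j = b.drop k := by
      rw [List.drop_append, List.drop_eq_nil_of_le (by omega), List.nil_append, hj,
          List.drop_succ_cons]
    have hcb : c ∈ b := by
      have hm : c ∈ b.drop k := by rw [← h0, ht]; exact List.mem_cons_self
      exact List.mem_of_mem_drop hm
    exact hb hcb

theorem pv_drop_mid (a b : List Char) (c : Char) : (a ++ c :: b).drop (a.length + 1) = b := by
  rw [List.drop_append, List.drop_eq_nil_of_le (by omega), List.nil_append,
      Nat.add_sub_cancel_left, List.drop_succ_cons, List.drop_zero]

-- ===== upper vs space =====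

theorem pv_upperChar_space (c : Char) (h : PySem.Chars.upperChar c = ' ') : c = ' ' := by
  unfold PySem.Chars.upperChar at h
  split at h
  · next hc =>
      unfold PySem.Chars.islower at hc
      simp only [Bool.and_eq_true, decide_eq_true_eq, Char.le_def,
        UInt32.le_iff_toNat_le, Char.toNat_val] at hc
      have h3 := congrArg Char.toNat h
      rw [Char.toNat_ofNat, if_pos (Or.inl (by simp at hc ⊢; omega))] at h3
      simp at h3 hc
      omega
  · exact h

theorem pv_space_notmem_upper (l : List Char) (h : (' ' : Char) ∉ l) :
    (' ' : Char) ∉ PySem.Chars.upper l := by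
  intro hm
  obtain ⟨c, hc, he⟩ := List.mem_map.mp hm
  exact h ((pv_upperChar_space c he) ▸ hc)

theorem pv_upper_append_space (a b : List Char) :
    PySem.Chars.upper (a ++ ' ' :: b) = PySem.Chars.upper a ++ ' ' :: PySem.Chars.upper b := by
  simp [PySem.Chars.upper]
  rfl

-- ===== endswith characterisation via the last-space decomposition =====

theorem pv_e0 (a b c : List Char) (hb : (' ' : Char) ∉ b) (hc : (' ' : Char) ∉ c) :
    ((' ' :: c) <:+ (a ++ ' ' :: b)) ↔ c = b := by
  constructor
  · rintro ⟨v, hv⟩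
    exact (pv_last_split_unique ' ' v c a b hv hc hb).2
  · rintro rfl; exact ⟨a, rfl⟩

theorem pv_e1 (a b c1 c2 : List Char) (hb : (' ' : Char) ∉ b) (hc2 : (' ' : Char) ∉ c2) :
    ((' ' :: (c1 ++ ' ' :: c2)) <:+ (a ++ ' ' :: b)) ↔ (((' ' :: c1) <:+ a) ∧ c2 = b) := by
  constructor
  · rintro ⟨v, hv⟩
    have hv' : (v ++ ' ' :: c1) ++ ' ' :: c2 = a ++ ' ' :: b := by
      simpa [List.append_assoc] using hv
    obtain ⟨h1, h2⟩ := pv_last_split_unique ' ' (v ++ ' ' :: c1) c2 a b hv' hc2 hb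
    exact ⟨⟨v, h1⟩, h2⟩
  · rintro ⟨⟨w, hw⟩, rfl⟩
    exact ⟨w, by simp [← hw, List.append_assoc]⟩

-- decidable facts about the literal city table
theorem pv_city_count : ∀ c ∈ mcCitiesChars, c.count ' ' ≤ 1 := by decide

theorem pv_no_conflict :
    ∀ x ∈ mcCitiesChars, ∀ y ∈ mcCitiesChars, ¬ ((' ' :: y) <:+ x) := by
  have h : mcCitiesChars.all (fun x => mcCitiesChars.all
      (fun y => ! PySem.Chars.endswith x (' ' :: y))) = true := by decide
  intro x hx y hy hsuf
  have h2 := (List.all_eq_true.mp ((List.all_eq_true.mp h) x hx)) y hy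
  rw [← PySem.Chars.endswith_iff] at hsuf
  simp [hsuf] at h2

-- classification of a matching city against the last-space decomposition of u
theorem pv_classify (a b c : List Char) (hb : (' ' : Char) ∉ b) (hc : c ∈ mcCitiesChars)
    (hsuf : (' ' :: c) <:+ (a ++ ' ' :: b)) :
    c = b ∨ ∃ c1 c2, c = c1 ++ ' ' :: c2 ∧ (' ' : Char) ∉ c1 ∧ (' ' : Char) ∉ c2 ∧
      ((' ' :: c1) <:+ a) ∧ c2 = b := by
  have hcount := pv_city_count c hc
  by_cases hspc : (' ' : Char) ∈ c
  · have h1 : c.count ' ' = 1 := by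
      have := List.count_pos_iff.mpr hspc; omega
    obtain ⟨c1, c2, rfl, hc1, hc2⟩ := pv_count_one_split ' ' _ h1
    have h2 := (pv_e1 a b c1 c2 hb hc2).mp hsuf
    exact Or.inr ⟨c1, c2, rfl, hc1, hc2, h2.1, h2.2⟩
  · exact Or.inl ((pv_e0 a b c hb hspc).mp hsuf)

-- find? over the table, given a designated unique match
theorem pv_find_some_of (u v : List Char) (hv : v ∈ mcCitiesChars)
    (hsuf : (' ' :: v) <:+ u)
    (huniq : ∀ c, c ∈ mcCitiesChars → ((' ' :: c) <:+ u) → c = v) :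
    (List.find? (fun city => PySem.Chars.endswith u (' ' :: city.toList)) mcKnownCities).map String.toList = some v := by
  cases hf : List.find? (fun city => PySem.Chars.endswith u (' ' :: city.toList)) mcKnownCities with
  | none =>
      obtain ⟨s, hs, hsv⟩ := List.mem_map.mp hv
      have h1 := List.find?_eq_none.mp hf s hs
      exact absurd ((PySem.Chars.endswith_iff _ _).mpr (hsv ▸ hsuf)) h1
  | some s' =>
      have h1 := (PySem.Chars.endswith_iff _ _).mp (List.find?_some (p := fun (city : String) => PySem.Chars.endswith u (' ' :: city.toList)) hf)
      have h2 : s'.toList ∈ mcCitiesChars := List.mem_map_of_mem (List.mem_of_find?_eq_some hf)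
      simp [huniq s'.toList h2 h1]

theorem pv_find_none_of (u : List Char)
    (h : ∀ c, c ∈ mcCitiesChars → ¬ ((' ' :: c) <:+ u)) :
    List.find? (fun city => PySem.Chars.endswith u (' ' :: city.toList)) mcKnownCities = none :=
  List.find?_eq_none.mpr (fun s hs hp =>
    h s.toList (List.mem_map_of_mem hs) ((PySem.Chars.endswith_iff _ _).mp hp))

-- reading aMain through the find? result
theorem pv_aMain_eta (desc : List Char) :
    aMain desc = match List.find? (fun city => PySem.Chars.endswith (PySem.Chars.upper desc) (' ' :: city.toList)) mcKnownCities with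
      | some city => aHit desc city.toList
      | none => aFallback desc := rfl

theorem pv_aMain_hit (desc v : List Char)
    (h : (List.find? (fun city => PySem.Chars.endswith (PySem.Chars.upper desc) (' ' :: city.toList)) mcKnownCities).map String.toList = some v) :
    aMain desc = aHit desc v := by
  rw [pv_aMain_eta]
  cases hf : List.find? (fun city => PySem.Chars.endswith (PySem.Chars.upper desc) (' ' :: city.toList)) mcKnownCities with
  | none => rw [hf] at h; simp at h
  | some c =>
      rw [hf] at h
      simp only [Option.map_some, Option.some.injEq] at h
      rw [← h]

theorem pv_aMain_fb (desc : List Char)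
    (h : List.find? (fun city => PySem.Chars.endswith (PySem.Chars.upper desc) (' ' :: city.toList)) mcKnownCities = none) :
    aMain desc = aFallback desc := by
  rw [pv_aMain_eta, h]

-- B's fallback branch, named for the proofs
def pvBFb (stripped : List Char) (parts : List (List Char)) : Option String × Option String :=
  if 2 ≤ parts.length ∧ 3 ≤ (parts.getLastD []).length then
    (some (String.ofList (pyRstripDash (PySem.Chars.strip (List.intercalate [' '] parts.dropLast)))),
     some (String.ofList (pyTitle (parts.getLastD []))))
  else (some (String.ofList stripped), none)

-- reading bCore through the candidate result (B's hit branch is the same expression as aHit)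
theorem pv_bCore_eta (s : List Char) :
    bCore s = match bCityOf (pyRsplitSpace2 s) with
      | some v => aHit s v
      | none => pvBFb s (pyRsplitSpace2 s) := rfl

-- bCityOf on the three possible part shapes
theorem pv_bCityOf_three (p0 p1 p2 : List Char) :
    bCityOf [p0, p1, p2] =
      (if mcCitiesChars.contains (PySem.Chars.upper p1 ++ ' ' :: PySem.Chars.upper p2) then
        some (PySem.Chars.upper p1 ++ ' ' :: PySem.Chars.upper p2)
      else if mcCitiesChars.contains (PySem.Chars.upper p2) then some (PySem.Chars.upper p2)
      else none) := by
  simp [bCityOf]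

theorem pv_bCityOf_two (p0 p1 : List Char) :
    bCityOf [p0, p1] =
      (if mcCitiesChars.contains (PySem.Chars.upper p1) then some (PySem.Chars.upper p1) else none) := by
  simp [bCityOf]

theorem pv_bCityOf_one (p0 : List Char) : bCityOf [p0] = none := by
  simp [bCityOf]

-- ===== the central lemma: aMain = bCore, by the space structure of the input =====

theorem pv_core_eq (s : List Char) : aMain s = bCore s := by
  rw [pv_bCore_eta]
  by_cases hsp : (' ' : Char) ∈ s
  · obtain ⟨a, b, rfl, hb⟩ := pv_last_occ ' ' s hsp
    have hidx : PySem.Chars.rfind (a ++ ' ' :: b) [' '] = (a.length : Int) := pv_rfind_append a b ' ' hb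
    have hne : ((a.length : Int)) ≠ -1 := by omega
    have htake : (a ++ ' ' :: b).take (((a.length : Int))).toNat = a := by
      rw [Int.toNat_natCast]; exact List.take_left
    have hdrop : (a ++ ' ' :: b).drop ((((a.length : Int))).toNat + 1) = b := by
      rw [Int.toNat_natCast]; exact pv_drop_mid a b ' '
    have hbU : (' ' : Char) ∉ PySem.Chars.upper b := pv_space_notmem_upper b hb
    by_cases hsa : (' ' : Char) ∈ a
    · -- at least two spaces: parts = [a2, b2, b]
      obtain ⟨a2, b2, rfl, hb2⟩ := pv_last_occ ' ' a hsa
      have hidx2 : PySem.Chars.rfind (a2 ++ ' ' :: b2) [' '] = (a2.length : Int) :=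
        pv_rfind_append a2 b2 ' ' hb2
      have hne2 : ((a2.length : Int)) ≠ -1 := by omega
      have hparts : pyRsplitSpace2 ((a2 ++ ' ' :: b2) ++ ' ' :: b) = [a2, b2, b] := by
        simp only [pyRsplitSpace2]
        rw [hidx, if_neg hne, htake, hdrop, hidx2, if_neg hne2]
        rw [show ((a2.length : Int)).toNat = a2.length from Int.toNat_natCast _, List.take_left,
            pv_drop_mid a2 b2 ' ']
      have hb2U : (' ' : Char) ∉ PySem.Chars.upper b2 := pv_space_notmem_upper b2 hb2
      have hupper : PySem.Chars.upper ((a2 ++ ' ' :: b2) ++ ' ' :: b)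
          = (PySem.Chars.upper a2 ++ ' ' :: PySem.Chars.upper b2) ++ ' ' :: PySem.Chars.upper b := by
        rw [pv_upper_append_space, pv_upper_append_space]
      rw [hparts, pv_bCityOf_three]
      by_cases h2m : (PySem.Chars.upper b2 ++ ' ' :: PySem.Chars.upper b) ∈ mcCitiesChars
      · rw [if_pos (List.contains_iff_mem.mpr h2m)]
        have hfind : (List.find? (fun city => PySem.Chars.endswith
              (PySem.Chars.upper ((a2 ++ ' ' :: b2) ++ ' ' :: b)) (' ' :: city.toList)) mcKnownCities).map String.toList
            = some (PySem.Chars.upper b2 ++ ' ' :: PySem.Chars.upper b) := by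
          rw [hupper]
          refine pv_find_some_of _ _ h2m ⟨PySem.Chars.upper a2, by simp⟩ ?_
          intro c hc hsuf
          rcases pv_classify (PySem.Chars.upper a2 ++ ' ' :: PySem.Chars.upper b2)
              (PySem.Chars.upper b) c hbU hc hsuf with rfl | ⟨c1, c2, rfl, hc1, hc2, hsufa, rfl⟩
          · exact absurd ⟨PySem.Chars.upper b2, rfl⟩ (pv_no_conflict _ h2m _ hc)
          · rw [(pv_e0 _ _ c1 hb2U hc1).mp hsufa]
        rw [pv_aMain_hit _ _ hfind]
      · rw [if_neg (fun h => h2m (List.contains_iff_mem.mp h))]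
        by_cases hbm : PySem.Chars.upper b ∈ mcCitiesChars
        · rw [if_pos (List.contains_iff_mem.mpr hbm)]
          have hfind : (List.find? (fun city => PySem.Chars.endswith
                (PySem.Chars.upper ((a2 ++ ' ' :: b2) ++ ' ' :: b)) (' ' :: city.toList)) mcKnownCities).map String.toList
              = some (PySem.Chars.upper b) := by
            rw [hupper]
            refine pv_find_some_of _ _ hbm ⟨PySem.Chars.upper a2 ++ ' ' :: PySem.Chars.upper b2, rfl⟩ ?_
            intro c hc hsuf
            rcases pv_classify (PySem.Chars.upper a2 ++ ' ' :: PySem.Chars.upper b2)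
                (PySem.Chars.upper b) c hbU hc hsuf with rfl | ⟨c1, c2, rfl, hc1, hc2, hsufa, rfl⟩
            · rfl
            · rw [(pv_e0 _ _ c1 hb2U hc1).mp hsufa] at hc
              exact absurd hc h2m
          rw [pv_aMain_hit _ _ hfind]
        · rw [if_neg (fun h => hbm (List.contains_iff_mem.mp h))]
          have hnone : List.find? (fun city => PySem.Chars.endswith
                (PySem.Chars.upper ((a2 ++ ' ' :: b2) ++ ' ' :: b)) (' ' :: city.toList)) mcKnownCities = none := by
            rw [hupper]
            refine pv_find_none_of _ ?_
            intro c hc hsuf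
            rcases pv_classify (PySem.Chars.upper a2 ++ ' ' :: PySem.Chars.upper b2)
                (PySem.Chars.upper b) c hbU hc hsuf with rfl | ⟨c1, c2, rfl, hc1, hc2, hsufa, rfl⟩
            · exact absurd hc hbm
            · rw [(pv_e0 _ _ c1 hb2U hc1).mp hsufa] at hc
              exact absurd hc h2m
          rw [pv_aMain_fb _ hnone]
          show aFallback ((a2 ++ ' ' :: b2) ++ ' ' :: b) = pvBFb ((a2 ++ ' ' :: b2) ++ ' ' :: b) [a2, b2, b]
          simp only [aFallback, pyRsplitSpace1, pvBFb]
          rw [hidx, if_neg hne, htake, hdrop]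
          rw [show (([a2 ++ ' ' :: b2, b] : List (List Char)).getD 1 []) = b from rfl,
              show (([a2 ++ ' ' :: b2, b] : List (List Char)).getD 0 []) = a2 ++ ' ' :: b2 from rfl,
              show (([a2, b2, b] : List (List Char)).getLastD []) = b from rfl,
              show (([a2, b2, b] : List (List Char)).dropLast) = [a2, b2] from rfl]
          rw [show List.intercalate [' '] [a2, b2] = a2 ++ ' ' :: b2 by simp [List.intercalate]]
          by_cases h3 : 3 ≤ b.length
          · rw [if_pos ⟨rfl, h3⟩, if_pos ⟨by simp, h3⟩]
          · rw [if_neg (fun h => h3 h.2), if_neg (fun h => h3 h.2)]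
    · -- exactly one space: parts = [a, b]
      have hfa : PySem.Chars.rfind a [' '] = -1 := pv_rfind_not_mem ' ' a hsa
      have hparts : pyRsplitSpace2 (a ++ ' ' :: b) = [a, b] := by
        simp only [pyRsplitSpace2]
        rw [hidx, if_neg hne, htake, hdrop, hfa, if_pos rfl]
      have hupper : PySem.Chars.upper (a ++ ' ' :: b)
          = PySem.Chars.upper a ++ ' ' :: PySem.Chars.upper b := pv_upper_append_space a b
      have haU : (' ' : Char) ∉ PySem.Chars.upper a := pv_space_notmem_upper a hsa
      rw [hparts, pv_bCityOf_two]
      by_cases hbm : PySem.Chars.upper b ∈ mcCitiesChars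
      · rw [if_pos (List.contains_iff_mem.mpr hbm)]
        have hfind : (List.find? (fun city => PySem.Chars.endswith
              (PySem.Chars.upper (a ++ ' ' :: b)) (' ' :: city.toList)) mcKnownCities).map String.toList
            = some (PySem.Chars.upper b) := by
          rw [hupper]
          refine pv_find_some_of _ _ hbm ⟨PySem.Chars.upper a, rfl⟩ ?_
          intro c hc hsuf
          rcases pv_classify (PySem.Chars.upper a) (PySem.Chars.upper b) c hbU hc hsuf with
            rfl | ⟨c1, c2, rfl, hc1, hc2, hsufa, rfl⟩
          · rfl
          · exact absurd (hsufa.subset List.mem_cons_self) haU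
        rw [pv_aMain_hit _ _ hfind]
      · rw [if_neg (fun h => hbm (List.contains_iff_mem.mp h))]
        have hnone : List.find? (fun city => PySem.Chars.endswith
              (PySem.Chars.upper (a ++ ' ' :: b)) (' ' :: city.toList)) mcKnownCities = none := by
          rw [hupper]
          refine pv_find_none_of _ ?_
          intro c hc hsuf
          rcases pv_classify (PySem.Chars.upper a) (PySem.Chars.upper b) c hbU hc hsuf with
            rfl | ⟨c1, c2, rfl, hc1, hc2, hsufa, rfl⟩
          · exact absurd hc hbm
          · exact absurd (hsufa.subset List.mem_cons_self) haU
        rw [pv_aMain_fb _ hnone]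
        show aFallback (a ++ ' ' :: b) = pvBFb (a ++ ' ' :: b) [a, b]
        simp only [aFallback, pyRsplitSpace1, pvBFb]
        rw [hidx, if_neg hne, htake, hdrop]
        rw [show (([a, b] : List (List Char)).getD 1 []) = b from rfl,
            show (([a, b] : List (List Char)).getD 0 []) = a from rfl,
            show (([a, b] : List (List Char)).getLastD []) = b from rfl,
            show (([a, b] : List (List Char)).dropLast) = [a] from rfl]
        rw [show List.intercalate [' '] [a] = a by simp [List.intercalate]]
        by_cases h3 : 3 ≤ b.length
        · rw [if_pos ⟨rfl, h3⟩, if_pos ⟨by simp, h3⟩]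
        · rw [if_neg (fun h => h3 h.2), if_neg (fun h => h3 h.2)]
  · -- no space: parts = [s], no city can match
    have hidx := pv_rfind_not_mem ' ' s hsp
    have hparts : pyRsplitSpace2 s = [s] := by
      simp only [pyRsplitSpace2]; rw [hidx, if_pos rfl]
    rw [hparts, pv_bCityOf_one]
    have hnone : List.find? (fun city => PySem.Chars.endswith
          (PySem.Chars.upper s) (' ' :: city.toList)) mcKnownCities = none :=
      pv_find_none_of _ (fun c _ hsuf =>
        (pv_space_notmem_upper s hsp) (hsuf.subset List.mem_cons_self))
    rw [pv_aMain_fb _ hnone]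
    show aFallback s = pvBFb s [s]
    simp only [aFallback, pyRsplitSpace1, pvBFb]
    rw [hidx, if_pos rfl]
    rw [if_neg (fun h => absurd h.1 (by simp)),
        if_neg (fun (h : 2 ≤ ([s] : List (List Char)).length ∧ _) => absurd h.1 (by simp))]

-- ===== VERDICT (by name: the statement is the Claim_ definition above) =====
theorem parse_mc_description_spec : Claim_equal_parse_mc_description := by
  intro desc1 _
  unfold Spec_parse_mc_description parse_mc_description parse_mc_description_alt
  by_cases h1 : desc1.toList = []
  · rw [if_pos (Or.inl h1), if_pos h1, if_pos rfl]
  · rw [if_neg h1]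
    by_cases h2 : (PySem.Str.strip desc1).toList = []
    · rw [if_pos (Or.inr h2), if_pos h2]
    · rw [if_neg (fun h => h.elim h1 h2), if_neg h2]
      exact pv_core_eq _
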